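-- pv_equiv track=rewrite | github.com/MinorGlitch/ethernity | ethernity/envelope.py | _build_prefix_table
-- ===== SOURCE A (Python) =====
-- def _build_prefix_table(paths: list[str]) -> list[str]:
--     counts: dict[str, int] = {}
--     for path in paths:
--         parts = path.split("/")
--         prefix = ""
--         for idx in range(len(parts) - 1):
--             prefix = parts[idx] if idx == 0 else f"{prefix}/{parts[idx]}"
--             counts[prefix] = counts.get(prefix, 0) + 1
--     prefixes = [""] + sorted((p for p, count in counts.items() if count > 1), key=lambda p: (len(p), p))
--     return prefixes
-- ===== SOURCE B (Python) =====
-- def _build_prefix_table(paths):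
--     # Collect every proper '/'-prefix of every path (with multiplicity),
--     # sort once by (length, lexicographic), then one group scan keeps the
--     # prefixes occurring more than once -- no dictionary needed.
--     pool = []
--     for path in paths:
--         parts = path.split("/")
--         for i in range(1, len(parts)):
--             pool.append("/".join(parts[:i]))
--     pool.sort(key=lambda p: (len(p), p))
--     result = [""]
--     i = 0
--     n = len(pool)
--     while i < n:
--         j = i
--         while j < n and pool[j] == pool[i]:
--             j += 1
--         if j - i > 1:
--             result.append(pool[i])
--         i = j
--     return result
-- ===== Notes on version B (the rewrite author's own statement) =====
-- stated objective: alternative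
-- what changed: Replaces the prefix-count dictionary with a flat multiset of all proper prefixes that is sorted once by (length, string) and scanned group-by-group for repeats, so no dict and no incremental prefix accumulator are needed.
import Mathlib
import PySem

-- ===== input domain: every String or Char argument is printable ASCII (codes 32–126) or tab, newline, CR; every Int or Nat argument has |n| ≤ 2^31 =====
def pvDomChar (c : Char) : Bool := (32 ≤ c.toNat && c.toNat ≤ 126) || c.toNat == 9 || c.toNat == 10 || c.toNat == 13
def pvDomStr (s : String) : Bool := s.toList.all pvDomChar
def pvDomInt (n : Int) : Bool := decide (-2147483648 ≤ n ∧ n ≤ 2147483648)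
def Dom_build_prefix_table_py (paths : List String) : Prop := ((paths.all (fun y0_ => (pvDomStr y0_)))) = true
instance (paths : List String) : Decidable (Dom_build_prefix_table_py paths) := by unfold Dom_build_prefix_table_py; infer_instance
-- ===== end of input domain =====

-- B replaces A's prefix-count dictionary by a flat list of all proper prefixes,
-- sorted once by (length, string) and scanned group-by-group for repeats (objective: alternative).

-- ===== PORT A =====
-- counts[prefix] = counts.get(prefix, 0) + 1, threading the incrementally built prefix
def build_prefix_table_py (paths : List String) : List String :=
  let counts : PySem.Dict String Int :=
    paths.foldl (fun counts path =>
      let parts := (PySem.Str.split? path "/").getD []   -- sep "/" ≠ "": split? never returns none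
      ((PySem.List.pyRange 0 ((parts.length : Int) - 1)).foldl
        (fun (st : String × PySem.Dict String Int) idx =>
          let pfx := if idx == 0 then PySem.List.pyGetD parts idx ""
                     else PySem.Str.join "" [st.1, "/", PySem.List.pyGetD parts idx ""]  -- f"{prefix}/{parts[idx]}"
          (pfx, st.2.insert pfx (st.2.getD pfx 0 + 1)))
        ("", counts)).2)
      PySem.Dict.empty
  [""] ++ PySem.List.sorted2 ((counts.items.filter (fun pc => pc.2 > 1)).map (fun pc => pc.1))
            (fun p => PySem.Str.len p) (fun p => p)

-- ===== PORT B =====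
-- group scan of the sorted pool: one element per run of length ≥ 2
def pvGroupScan : List String → List String
  | [] => []
  | x :: rest =>
      let run := rest.takeWhile (fun y => y == x)
      let rest' := rest.dropWhile (fun y => y == x)
      (if run.length + 1 > 1 then [x] else []) ++ pvGroupScan rest'
  termination_by l => l.length
  decreasing_by
    simp only [List.length_cons]
    exact Nat.lt_succ_of_le (List.length_dropWhile_le _ _)

def build_prefix_table_py_alt (paths : List String) : List String :=
  let pool : List String :=
    paths.foldl (fun acc path =>
      let parts := (PySem.Str.split? path "/").getD []
      (PySem.List.pyRange 1 (parts.length : Int)).foldl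
        (fun acc i => acc ++ [PySem.Str.join "/" (PySem.List.slice parts none (some i))]) acc)
      []
  let pool := PySem.List.sorted2 pool (fun p => PySem.Str.len p) (fun p => p)
  [""] ++ pvGroupScan pool

-- ===== PRECONDITION & SPEC =====
def Spec_build_prefix_table_py (paths : List String) (out : List String) : Prop := out = build_prefix_table_py_alt paths
instance (paths : List String) (out : List String) : Decidable (Spec_build_prefix_table_py paths out) := by unfold Spec_build_prefix_table_py; infer_instance

-- ===== CLAIM (what is proved, stated in full; the proofs are below) =====
def Claim_equal_build_prefix_table_py : Prop := ∀ (paths : List String), Dom_build_prefix_table_py paths → Spec_build_prefix_table_py paths (build_prefix_table_py paths)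

-- ===== LEMMAS AND PROOFS =====

-- the (len, string) sort key, as one lexicographic key
def pvKey (p : String) : Lex (Int × String) := toLex (PySem.Str.len p, p)

lemma pvKey_inj {a b : String} (h : pvKey a = pvKey b) : a = b := by
  have := congrArg (fun k => (ofLex k).2) h
  simpa [pvKey] using this

-- sorted2 with keys (len, id) is sorted with the lexicographic key pvKey
lemma pv_sorted2_eq_sorted (xs : List String) :
    PySem.List.sorted2 xs (fun p => PySem.Str.len p) (fun p => p) false
      = PySem.List.sorted xs pvKey false := by
  rw [PySem.List.sorted_eq_foldl_insertBy]
  simp only [PySem.List.sorted2, Bool.false_eq_true, if_false]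
  have hfun : (fun (a b : String) =>
      decide (PySem.Str.len a < PySem.Str.len b) ||
        (!decide (PySem.Str.len b < PySem.Str.len a) && decide (a < b)))
      = fun a b => decide (pvKey a < pvKey b) := by
    funext a b
    rcases lt_trichotomy a.length b.length with h | h | h
    · simp [pvKey, Prod.Lex.toLex_lt_toLex, PySem.Str.len_eq, h]
    · simp [pvKey, Prod.Lex.toLex_lt_toLex, PySem.Str.len_eq, h]
    · have h1 : ¬ a.length < b.length := Nat.lt_asymm h
      simp [pvKey, Prod.Lex.toLex_lt_toLex, PySem.Str.len_eq, h, h1, h.ne']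
  rw [hfun]

-- the per-path prefix list
def pvPrefixes (parts : List String) : List String :=
  (List.range (parts.length - 1)).map (fun i => PySem.Str.join "/" (parts.take (i + 1)))

-- the flat pool of all prefixes
def pvPool (paths : List String) : List String :=
  paths.flatMap (fun path => pvPrefixes ((PySem.Str.split? path "/").getD []))

lemma pvChars_join_snoc (sep y : List Char) (ys : List (List Char)) (h : ys ≠ []) :
    PySem.Chars.join sep (ys ++ [y]) = PySem.Chars.join sep ys ++ sep ++ y := by
  induction ys with
  | nil => exact absurd rfl h
  | cons a t ih =>
    cases t with
    | nil => simp [PySem.Chars.join_cons_cons, PySem.Chars.join_singleton]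
    | cons b u =>
      have hih := ih (by simp)
      simp only [List.cons_append, PySem.Chars.join_cons_cons] at hih ⊢
      rw [hih]
      simp [List.append_assoc]

lemma pv_join_singleton (a : String) : PySem.Str.join "/" [a] = a := by
  rw [← String.toList_inj, PySem.Str.toList_join]
  simp [PySem.Chars.join_singleton]

-- joining one more component
lemma pv_join_snoc (xs : List String) (x : String) (h : xs ≠ []) :
    PySem.Str.join "" [PySem.Str.join "/" xs, "/", x] = PySem.Str.join "/" (xs ++ [x]) := by
  rw [← String.toList_inj]
  simp only [PySem.Str.toList_join, List.map_cons, List.map_nil, List.map_append,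
    PySem.Chars.join_cons_cons, PySem.Chars.join_singleton]
  rw [pvChars_join_snoc _ _ _ (by simpa using h)]
  simp

-- the state of A's inner loop after k steps
lemma pv_inner_invariant (parts : List String) (hp : parts ≠ []) (d : PySem.Dict String Int)
    (k : Nat) (hk : k ≤ parts.length - 1) :
    (List.range k).foldl
        (fun (st : String × PySem.Dict String Int) (i : Nat) =>
          let pfx := if ((i : Int) == 0) then PySem.List.pyGetD parts (i : Int) ""
                     else PySem.Str.join "" [st.1, "/", PySem.List.pyGetD parts (i : Int) ""]
          (pfx, st.2.insert pfx (st.2.getD pfx 0 + 1)))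
        ("", d)
      = (PySem.Str.join "/" (parts.take k),
         ((pvPrefixes parts).take k).foldl (fun d p => d.insert p (d.getD p 0 + 1)) d) := by
  have hlen : 0 < parts.length := List.length_pos_of_ne_nil hp
  induction k with
  | zero =>
    simp only [List.range_zero, List.foldl_nil, List.take_zero]
    rfl
  | succ k ih =>
    have hk' : k ≤ parts.length - 1 := Nat.le_of_succ_le hk
    have hklt : k < parts.length - 1 := hk
    have hklen : k < parts.length := by omega
    rw [List.range_succ, List.foldl_append, ih hk']
    have hget : PySem.List.pyGetD parts (k : Int) "" = parts[k] := by
      rw [PySem.List.pyGetD_natCast, List.getD_eq_getElem _ _ hklen]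
    have htake : parts.take (k + 1) = parts.take k ++ [parts[k]] := by
      rw [List.take_add_one]
      simp [List.getElem?_eq_getElem hklen]
    have hpfxtake : (pvPrefixes parts).take (k + 1)
        = (pvPrefixes parts).take k ++ [PySem.Str.join "/" (parts.take (k + 1))] := by
      rw [List.take_add_one]
      simp [pvPrefixes, List.getElem?_map, List.getElem?_range hklt]
    rw [hpfxtake, List.foldl_append]
    simp only [List.foldl_cons, List.foldl_nil]
    cases k with
    | zero =>
      have h1 : parts.take 1 = [parts[0]] := by simpa using htake
      have hget0 : PySem.List.pyGetD parts (0 : Int) "" = parts[0] := by simpa using hget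
      simp only [Nat.cast_zero, beq_self_eq_true, if_true, hget0, h1, pv_join_singleton]
    | succ j =>
      have hne : (((j + 1 : Nat) : Int) == 0) = false := by
        simp only [beq_eq_false_iff_ne, ne_eq]
        intro hc
        omega
      have htk : parts.take (j + 1) ≠ [] := by
        simp only [ne_eq, List.take_eq_nil_iff]
        rintro (h | h)
        · omega
        · exact hp h
      simp only [hne, Bool.false_eq_true, if_false, hget]
      rw [pv_join_snoc _ _ htk, ← htake]

-- A's inner loop is a fold of the insert-increment step over pvPrefixes
lemma pv_inner_eq (parts : List String) (d : PySem.Dict String Int) :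
    ((PySem.List.pyRange 0 ((parts.length : Int) - 1)).foldl
        (fun (st : String × PySem.Dict String Int) idx =>
          let pfx := if idx == 0 then PySem.List.pyGetD parts idx ""
                     else PySem.Str.join "" [st.1, "/", PySem.List.pyGetD parts idx ""]
          (pfx, st.2.insert pfx (st.2.getD pfx 0 + 1)))
        ("", d)).2
      = (pvPrefixes parts).foldl (fun d p => d.insert p (d.getD p 0 + 1)) d := by
  by_cases hp : parts = []
  · subst hp
    have h0 : ((([] : List String).length : Int) - 1) = -1 := by simp
    rw [h0]
    have : PySem.List.pyRange 0 (-1) = [] := by decide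
    rw [this]
    simp [pvPrefixes]
  · have hlen : 0 < parts.length := List.length_pos_of_ne_nil hp
    have hcast : ((parts.length : Int) - 1) = ((parts.length - 1 : Nat) : Int) := by
      push_cast [hlen]
      omega
    rw [hcast, PySem.List.pyRange_zero_natCast, List.foldl_map,
      pv_inner_invariant parts hp d (parts.length - 1) le_rfl]
    have : (pvPrefixes parts).take (parts.length - 1) = pvPrefixes parts := by
      apply List.take_of_length_le
      simp [pvPrefixes]
    rw [this]

-- A's dictionary is the counter of the pool
lemma pv_counts_eq (paths : List String) :
    paths.foldl (fun counts path =>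
      let parts := (PySem.Str.split? path "/").getD []
      ((PySem.List.pyRange 0 ((parts.length : Int) - 1)).foldl
        (fun (st : String × PySem.Dict String Int) idx =>
          let pfx := if idx == 0 then PySem.List.pyGetD parts idx ""
                     else PySem.Str.join "" [st.1, "/", PySem.List.pyGetD parts idx ""]
          (pfx, st.2.insert pfx (st.2.getD pfx 0 + 1)))
        ("", counts)).2)
      PySem.Dict.empty
      = PySem.Dict.counter (pvPool paths) := by
  rw [← PySem.Dict.foldl_insert_getD_add_one_eq_counter]
  unfold pvPool
  rw [List.foldl_flatMap]
  exact PySem.List.foldl_congr_mem paths _ _ _ (fun acc path _ => pv_inner_eq _ acc)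

-- B's pool builder builds pvPool
lemma pv_pyRange_one (m : Nat) :
    PySem.List.pyRange 1 (m : Int) = (List.range (m - 1)).map (fun i => ((i + 1 : Nat) : Int)) := by
  cases m with
  | zero =>
    have : ((0 : Nat) : Int) = 0 := rfl
    rw [this]
    decide
  | succ k =>
    have happ : PySem.List.pyRange 0 ((k + 1 : Nat) : Int)
        = PySem.List.pyRange 0 1 ++ PySem.List.pyRange 1 ((k + 1 : Nat) : Int) :=
      PySem.List.pyRange_one_append 0 1 _ (by omega) (by exact_mod_cast Nat.succ_le_succ (Nat.zero_le k))
    have h01 : PySem.List.pyRange 0 1 = [0] := by decide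
    rw [PySem.List.pyRange_zero_natCast, h01, List.range_succ_eq_map] at happ
    simp only [List.map_cons, Nat.cast_zero, List.singleton_append, List.cons.injEq,
      true_and] at happ
    rw [← happ, List.map_map]
    simp [Function.comp_def, Nat.succ_eq_add_one]

set_option maxHeartbeats 1000000 in
lemma pv_pool_eq (paths : List String) :
    paths.foldl (fun acc path =>
      let parts := (PySem.Str.split? path "/").getD []
      (PySem.List.pyRange 1 (parts.length : Int)).foldl
        (fun acc i => acc ++ [PySem.Str.join "/" (PySem.List.slice parts none (some i))]) acc)
      []
      = pvPool paths := by
  have hstep : ∀ (acc : List String), ∀ path ∈ paths,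
      (let parts := (PySem.Str.split? path "/").getD []
       (PySem.List.pyRange 1 (parts.length : Int)).foldl
        (fun acc i => acc ++ [PySem.Str.join "/" (PySem.List.slice parts none (some i))]) acc)
      = acc ++ pvPrefixes ((PySem.Str.split? path "/").getD []) := by
    intro acc path _
    simp only
    set parts := (PySem.Str.split? path "/").getD [] with hparts
    rw [PySem.List.foldl_append_singleton_eq_map, pv_pyRange_one, List.map_map]
    apply congrArg (fun t => acc ++ t)
    unfold pvPrefixes
    apply List.map_congr_left
    intro i _
    simp only [Function.comp_apply]
    rw [PySem.List.slice_to _ (by exact_mod_cast Nat.zero_le (i + 1))]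
    simp
  refine Eq.trans (PySem.List.foldl_congr_mem paths _
    (fun acc path => acc ++ pvPrefixes ((PySem.Str.split? path "/").getD [])) [] hstep) ?_
  rw [PySem.List.foldl_append_eq_flatMap]
  simp [pvPool]

-- elements after the leading run are strictly larger in key
lemma pv_drop_lt (x : String) (l : List String)
    (hle : ∀ y ∈ l, pvKey x ≤ pvKey y)
    (hp : l.Pairwise (fun a b => pvKey a ≤ pvKey b)) :
    ∀ z ∈ l.dropWhile (fun y => y == x), pvKey x < pvKey z := by
  induction l with
  | nil => simp
  | cons a t ih =>
    rw [List.dropWhile_cons]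
    by_cases ha : (a == x) = true
    · simp only [ha, if_true]
      exact ih (fun y hy => hle y (List.mem_cons_of_mem _ hy)) hp.of_cons
    · simp only [ha, Bool.false_eq_true, if_false]
      have hax : a ≠ x := by simpa using ha
      have h1 : pvKey x < pvKey a :=
        lt_of_le_of_ne (hle a List.mem_cons_self) (fun he => hax (pvKey_inj he.symm))
      intro z hz
      rcases List.mem_cons.mp hz with rfl | hz
      · exact h1
      · exact lt_of_lt_of_le h1 ((List.pairwise_cons.mp hp).1 z hz)

-- group scan on a key-sorted list: counts collapse to 0/1 at threshold 2
lemma pv_gs_count_aux (n : Nat) : ∀ (s : List String), s.length ≤ n →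
    s.Pairwise (fun a b => pvKey a ≤ pvKey b) →
    ∀ p, (pvGroupScan s).count p = if 2 ≤ s.count p then 1 else 0 := by
  induction n with
  | zero =>
    intro s hlen _ p
    have : s = [] := List.eq_nil_of_length_eq_zero (Nat.le_zero.mp hlen)
    subst this
    simp [pvGroupScan]
  | succ n ih =>
    intro s hlen hp p
    cases s with
    | nil => simp [pvGroupScan]
    | cons x rest =>
      simp only [pvGroupScan]
      have hxle : ∀ y ∈ rest, pvKey x ≤ pvKey y := (List.pairwise_cons.mp hp).1
      have hpr : rest.Pairwise (fun a b => pvKey a ≤ pvKey b) := (List.pairwise_cons.mp hp).2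
      have hlt : ∀ z ∈ rest.dropWhile (fun y => y == x), pvKey x < pvKey z :=
        pv_drop_lt x rest hxle hpr
      have hxnot : x ∉ rest.dropWhile (fun y => y == x) := fun h => lt_irrefl _ (hlt x h)
      have hp' : (rest.dropWhile (fun y => y == x)).Pairwise (fun a b => pvKey a ≤ pvKey b) :=
        hpr.sublist (List.dropWhile_sublist _)
      have hlen' : (rest.dropWhile (fun y => y == x)).length ≤ n :=
        le_trans (List.length_dropWhile_le _ _) (by simpa using Nat.lt_succ_iff.mp (Nat.lt_of_lt_of_le (Nat.lt_succ_self _) hlen))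
      have hrun : ∀ y ∈ rest.takeWhile (fun y => y == x), y = x := by
        intro y hy
        simpa using List.mem_takeWhile_imp hy
      have hrest : rest.takeWhile (fun y => y == x) ++ rest.dropWhile (fun y => y == x) = rest :=
        List.takeWhile_append_dropWhile
      have hcx : rest.count x = (rest.takeWhile (fun y => y == x)).length := by
        have h1 : List.count x (rest.takeWhile (fun y => y == x))
            = (rest.takeWhile (fun y => y == x)).length :=
          List.count_eq_length.mpr (fun b hb => (hrun b hb).symm)
        have h2 : List.count x (rest.dropWhile (fun y => y == x)) = 0 :=
          List.count_eq_zero.mpr hxnot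
        calc rest.count x
            = List.count x (rest.takeWhile (fun y => y == x) ++ rest.dropWhile (fun y => y == x)) := by
              rw [hrest]
          _ = (rest.takeWhile (fun y => y == x)).length := by
              rw [List.count_append, h1, h2, Nat.add_zero]
      have hih := ih (rest.dropWhile (fun y => y == x)) hlen' hp' p
      by_cases hpx : p = x
      · subst hpx
        have hc0 : (rest.dropWhile (fun y => y == p)).count p = 0 := List.count_eq_zero.mpr hxnot
        have hgs0 : List.count p (pvGroupScan (rest.dropWhile (fun y => y == p))) = 0 := by
          rw [hih, hc0]
          norm_num
        rw [List.count_append, hgs0, List.count_cons_self, hcx]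
        split_ifs with h1 h2
        · simp
        · omega
        · omega
        · simp
      · have hcp : rest.count p = (rest.dropWhile (fun y => y == x)).count p := by
          have h0 : (rest.takeWhile (fun y => y == x)).count p = 0 :=
            List.count_eq_zero.mpr (fun h => hpx (hrun p h))
          calc rest.count p
              = List.count p (rest.takeWhile (fun y => y == x) ++ rest.dropWhile (fun y => y == x)) := by
                rw [hrest]
            _ = (rest.dropWhile (fun y => y == x)).count p := by
                rw [List.count_append, h0, Nat.zero_add]
        have hxp : ¬ x = p := fun h => hpx h.symm
        have hcons : List.count p (x :: rest) = List.count p rest := by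
          simp [hxp]
        have hif0 : List.count p
            (if (rest.takeWhile (fun y => y == x)).length + 1 > 1 then [x] else []) = 0 := by
          split
          · simp [hxp]
          · exact List.count_nil
        rw [List.count_append, hif0, hih, ← hcp, hcons, Nat.zero_add]

lemma pv_groupScan_count (s : List String) (hs : s.Pairwise (fun a b => pvKey a ≤ pvKey b)) (p : String) :
    (pvGroupScan s).count p = if 2 ≤ s.count p then 1 else 0 :=
  pv_gs_count_aux s.length s le_rfl hs p

lemma pv_groupScan_mem (s : List String) (hs : s.Pairwise (fun a b => pvKey a ≤ pvKey b)) (p : String) :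
    p ∈ pvGroupScan s ↔ 2 ≤ s.count p := by
  rw [← List.count_pos_iff, pv_groupScan_count s hs p]
  split <;> simp_all

lemma pv_groupScan_nodup (s : List String) (hs : s.Pairwise (fun a b => pvKey a ≤ pvKey b)) :
    (pvGroupScan s).Nodup := by
  rw [List.nodup_iff_count_le_one]
  intro a
  rw [pv_groupScan_count s hs a]
  split <;> omega

lemma pv_gs_pairwise_aux (n : Nat) : ∀ (s : List String), s.length ≤ n →
    s.Pairwise (fun a b => pvKey a ≤ pvKey b) →
    (pvGroupScan s).Pairwise (fun a b => pvKey a < pvKey b) := by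
  induction n with
  | zero =>
    intro s hlen _
    have : s = [] := List.eq_nil_of_length_eq_zero (Nat.le_zero.mp hlen)
    subst this
    simp [pvGroupScan]
  | succ n ih =>
    intro s hlen hp
    cases s with
    | nil => simp [pvGroupScan]
    | cons x rest =>
      simp only [pvGroupScan]
      have hxle : ∀ y ∈ rest, pvKey x ≤ pvKey y := (List.pairwise_cons.mp hp).1
      have hpr : rest.Pairwise (fun a b => pvKey a ≤ pvKey b) := (List.pairwise_cons.mp hp).2
      have hlt : ∀ z ∈ rest.dropWhile (fun y => y == x), pvKey x < pvKey z :=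
        pv_drop_lt x rest hxle hpr
      have hp' : (rest.dropWhile (fun y => y == x)).Pairwise (fun a b => pvKey a ≤ pvKey b) :=
        hpr.sublist (List.dropWhile_sublist _)
      have hlen' : (rest.dropWhile (fun y => y == x)).length ≤ n :=
        le_trans (List.length_dropWhile_le _ _) (by simpa using Nat.lt_succ_iff.mp (Nat.lt_of_lt_of_le (Nat.lt_succ_self _) hlen))
      by_cases hr : (rest.takeWhile (fun y => y == x)).length + 1 > 1
      · rw [if_pos hr, List.singleton_append, List.pairwise_cons]
        refine ⟨?_, ih _ hlen' hp'⟩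
        intro b hb
        have hbmem : b ∈ rest.dropWhile (fun y => y == x) := by
          have := (pv_groupScan_mem _ hp' b).mp hb
          exact List.count_pos_iff.mp (by omega)
        exact hlt b hbmem
      · rw [if_neg hr, List.nil_append]
        exact ih _ hlen' hp' 

-- ===== VERDICT (by name: the statement is the Claim_ definition above) =====
theorem build_prefix_table_py_spec : Claim_equal_build_prefix_table_py := by
  intro paths _
  show build_prefix_table_py paths = build_prefix_table_py_alt paths
  simp only [build_prefix_table_py, build_prefix_table_py_alt]
  rw [pv_counts_eq, pv_pool_eq, pv_sorted2_eq_sorted, pv_sorted2_eq_sorted]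
  apply congrArg (fun t => [""] ++ t)
  set pool := pvPool paths with hpool
  have hs : (PySem.List.sorted pool pvKey false).Pairwise (fun a b => pvKey a ≤ pvKey b) :=
    PySem.List.sorted_pairwise pool pvKey
  have hcount : ∀ p, (PySem.List.sorted pool pvKey false).count p = pool.count p :=
    fun p => (PySem.List.sorted_perm pool pvKey false).count_eq p
  -- the filtered key list of the counter
  have hlist : ((PySem.Dict.counter pool).items.filter (fun pc => pc.2 > 1)).map (fun pc => pc.1)
      = (PySem.Set.ofList pool).filter (fun k => decide ((1 : Int) < (pool.count k : Int))) := by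
    rw [PySem.Dict.items_counter, List.filter_map]
    rw [List.map_map]
    simp [Function.comp_def]
  rw [hlist]
  apply PySem.List.sorted_eq_of_perm_of_pairwise_lt
  · rw [List.perm_ext_iff_of_nodup (pv_groupScan_nodup _ hs)
      ((PySem.Set.nodup_ofList pool).filter _)]
    intro p
    rw [pv_groupScan_mem _ hs p, hcount p, List.mem_filter]
    constructor
    · intro h
      refine ⟨(PySem.Set.mem_ofList pool p).mpr (List.count_pos_iff.mp (by omega)), ?_⟩
      simp
      exact_mod_cast by omega
    · rintro ⟨_, h⟩
      simp at h
      omega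
  · exact pv_gs_pairwise_aux _ _ le_rfl hs
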